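-- pv_equiv track=rewrite | github.com/simonEllershaw/TravellingSalesmanAISearch | utility.py | tourIsValid
-- ===== SOURCE A (Python) =====
-- def tourIsValid(aTour):
--     """Check that tour is valid"""
--     unique = []
--     if not (aTour[0] == aTour[len(aTour) - 1]):  # check circular
--         return False
--     for city in aTour[1:]:  # check each city only in tour once
--         if city in unique:
--             return False
--         else:
--             unique.append(city)
--     return True
-- ===== SOURCE B (Python) =====
-- def tourIsValid(aTour):
--     """Check that tour is valid"""
--     if aTour[0] != aTour[len(aTour) - 1]:  # check circular
--         return False
--     tail = sorted(aTour[1:])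
--     # after sorting, any duplicate sits next to its twin
--     return all(x != y for x, y in zip(tail, tail[1:]))
-- ===== Notes on version B (the rewrite author's own statement) =====
-- stated objective: alternative
-- what changed: Replaces the scan-with-accumulator duplicate search by sort-then-adjacent-scan: sort the tail once and check that no two neighbouring entries are equal.
import Mathlib
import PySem

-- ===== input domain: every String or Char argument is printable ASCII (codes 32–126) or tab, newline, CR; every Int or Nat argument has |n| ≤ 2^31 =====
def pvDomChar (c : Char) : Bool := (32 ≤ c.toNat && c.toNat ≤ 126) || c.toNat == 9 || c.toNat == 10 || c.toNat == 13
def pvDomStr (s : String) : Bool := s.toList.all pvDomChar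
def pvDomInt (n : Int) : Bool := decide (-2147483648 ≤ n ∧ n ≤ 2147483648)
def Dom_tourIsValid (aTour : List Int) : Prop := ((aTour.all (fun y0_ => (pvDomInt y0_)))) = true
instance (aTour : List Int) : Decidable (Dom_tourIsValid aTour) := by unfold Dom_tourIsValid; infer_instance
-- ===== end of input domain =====

-- B replaces A's scan-with-accumulator duplicate search by sort-then-adjacent-scan
-- (sort the tail, then check no two neighbouring entries are equal); objective: alternative.


-- ===== PORT A =====
-- the 'for city in aTour[1:]' loop with accumulator 'unique' and early return False
def tourIsValidLoop (unique : List Int) (cities : List Int) : Bool :=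
  match cities with
  | [] => true
  | city :: rest =>
      if city ∈ unique then false
      else tourIsValidLoop (unique ++ [city]) rest

def tourIsValid (aTour : List Int) : Bool :=
  if ¬ (PySem.List.pyGet? aTour 0 = PySem.List.pyGet? aTour ((aTour.length : Int) - 1)) then
    false
  else
    tourIsValidLoop [] (PySem.List.slice aTour (some 1) none)

-- ===== PORT B =====
-- 'all(x != y for x, y in zip(tail, tail[1:]))' ported by hand as structural recursion
-- over adjacent pairs (exact: zip of a list with its own tail pairs the neighbours).
def adjDistinct (xs : List Int) : Bool :=
  match xs with
  | [] => true
  | [_] => true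
  | a :: b :: rest => (a != b) && adjDistinct (b :: rest)

def tourIsValid_alt (aTour : List Int) : Bool :=
  if PySem.List.pyGet? aTour 0 ≠ PySem.List.pyGet? aTour ((aTour.length : Int) - 1) then
    false
  else
    let tail := PySem.List.sorted (PySem.List.slice aTour (some 1) none) (fun x => x) false
    adjDistinct tail

-- ===== PRECONDITION & SPEC =====
-- A raises IndexError on the empty list (aTour[0]); excluded.
def Pre_tourIsValid (aTour : List Int) : Prop := aTour ≠ []
instance (aTour : List Int) : Decidable (Pre_tourIsValid aTour) := by unfold Pre_tourIsValid; infer_instance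
def pvWitness_tourIsValid : List Int := ([1, 2, 1])

def Spec_tourIsValid (aTour : List Int) (out : Bool) : Prop := out = tourIsValid_alt aTour
instance (aTour : List Int) (out : Bool) : Decidable (Spec_tourIsValid aTour out) := by unfold Spec_tourIsValid; infer_instance

-- ===== CLAIM (what is proved, stated in full; the proofs are below) =====
def Claim_equal_tourIsValid : Prop := ∀ (aTour : List Int), Dom_tourIsValid aTour → Pre_tourIsValid aTour → Spec_tourIsValid aTour (tourIsValid aTour)

-- ===== LEMMAS AND PROOFS =====

-- A's loop returns true iff the remaining cities are duplicate-free and disjoint from the accumulator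
theorem tourIsValidLoop_eq_true_iff (cities unique : List Int) :
    tourIsValidLoop unique cities = true ↔ (cities.Nodup ∧ ∀ x ∈ cities, x ∉ unique) := by
  induction cities generalizing unique with
  | nil => simp [tourIsValidLoop]
  | cons c rest ih =>
      by_cases hc : c ∈ unique
      · simp [tourIsValidLoop, hc]
      · simp only [tourIsValidLoop, if_neg hc, ih, List.nodup_cons, List.mem_cons, List.mem_append]
        constructor
        · rintro ⟨hn, hdisj⟩
          refine ⟨⟨fun hmem => hdisj c hmem (by simp), hn⟩, ?_⟩
          intro x hx hxu
          rcases hx with rfl | hx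
          · exact hc hxu
          · exact hdisj x hx (by simp [hxu])
        · rintro ⟨⟨hcr, hn⟩, hdisj⟩
          refine ⟨hn, fun x hx hxm => ?_⟩
          rcases hxm with hxu | hxc
          · exact hdisj x (Or.inr hx) hxu
          · simp at hxc; subst hxc; exact hcr hx

-- on a weakly increasing list, adjacent-distinct is exactly strictly increasing
theorem adjDistinct_sorted_iff (l : List Int) (h : l.Pairwise (· ≤ ·)) :
    adjDistinct l = true ↔ l.Pairwise (· < ·) := by
  induction l with
  | nil => simp [adjDistinct]
  | cons a t ih =>
      cases t with
      | nil => simp [adjDistinct]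
      | cons b r =>
          have hab : a ≤ b := (List.pairwise_cons.1 h).1 b (by simp)
          have htail : (b :: r).Pairwise (· ≤ ·) := (List.pairwise_cons.1 h).2
          have hbr : ∀ x ∈ r, b ≤ x := (List.pairwise_cons.1 htail).1
          simp only [adjDistinct, Bool.and_eq_true, bne_iff_ne, ih htail,
            List.pairwise_cons (l := b :: r) (a := a), List.mem_cons]
          constructor
          · rintro ⟨hne, hlt⟩
            refine ⟨?_, hlt⟩
            intro x hx
            rcases hx with rfl | hx
            · exact lt_of_le_of_ne hab hne
            · exact lt_of_lt_of_le (lt_of_le_of_ne hab hne) (hbr x hx)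
          · rintro ⟨hall, hlt⟩
            exact ⟨ne_of_lt (hall b (Or.inl rfl)), hlt⟩

-- a list is duplicate-free iff its sorted copy is strictly increasing
theorem nodup_iff_sorted_pairwise_lt (l : List Int) :
    (PySem.List.sorted l (fun x => x) false).Pairwise (· < ·) ↔ l.Nodup := by
  have hle : (PySem.List.sorted l (fun x => x) false).Pairwise (· ≤ ·) :=
    PySem.List.sorted_pairwise l (fun x => x)
  have hperm : (PySem.List.sorted l (fun x => x) false).Perm l :=
    PySem.List.sorted_perm l (fun x => x) false
  rw [← hperm.nodup_iff]
  constructor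
  · intro hlt
    exact (hlt.imp fun h => ne_of_lt h)
  · intro hne
    exact (hle.and hne).imp fun ⟨h1, h2⟩ => lt_of_le_of_ne h1 h2

theorem tourIsValid_spec : Claim_equal_tourIsValid := by
  intro aTour _ _
  unfold Spec_tourIsValid tourIsValid tourIsValid_alt
  by_cases h : PySem.List.pyGet? aTour 0 = PySem.List.pyGet? aTour ((aTour.length : Int) - 1)
  · simp only [h, not_true_eq_false, if_false, ne_eq]
    rw [Bool.eq_iff_iff, tourIsValidLoop_eq_true_iff,
      adjDistinct_sorted_iff _ (PySem.List.sorted_pairwise _ _),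
      nodup_iff_sorted_pairwise_lt]
    simp
  · simp [h]
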